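-- pv_equiv track=rewrite | github.com/JeremyMrzyglocki/NxNxN_solver | solver.py | create_state_matrix
-- ===== SOURCE A (Python) =====
-- def create_state_matrix(M): # This holds all of the information
--     region_size = 2 * M
--     rows, cols = 3 * region_size, 4 * region_size
--     face_map = {
--         (0, 1): ('W', 1), (1, 0): ('O', 5), (1, 1): ('G', 9),
--         (1, 2): ('R', 13), (1, 3): ('B', 17), (2, 1): ('Y', 21),
--     }
--     quad_offset = {(0, 0): 0, (0, 1): 1, (1, 1): 2, (1, 0): 3}
--
--     def ab(qr, qc, ip, jp):
--         if (qr, qc) == (0, 0): return M - jp, M - ip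
--         if (qr, qc) == (0, 1): return M - ip, jp + 1
--         if (qr, qc) == (1, 1): return jp + 1, ip + 1
--         return ip + 1, M - jp
--
--     matrix = []
--     for i in range(rows):
--         rr, ri = divmod(i, region_size)
--         row = []
--         for j in range(cols):
--             rc, ci = divmod(j, region_size)
--             key = (rr, rc)
--             if key in face_map:
--                 _, base = face_map[key]
--                 br, bc = ri // M, ci // M
--                 k = base + quad_offset[(br, bc)]
--                 a, b = ab(br, bc, ri % M, ci % M)
--                 row.append((k, a, b))
--             else:
--                 row.append(None)
--         matrix.append(row)
--     return matrix
-- ===== SOURCE B (Python) =====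
-- def create_state_matrix(M):
--     region_size = 2 * M
--     quad_offset = {(0, 0): 0, (0, 1): 1, (1, 1): 2, (1, 0): 3}
--
--     def ab(qr, qc, ip, jp):
--         if (qr, qc) == (0, 0): return M - jp, M - ip
--         if (qr, qc) == (0, 1): return M - ip, jp + 1
--         if (qr, qc) == (1, 1): return jp + 1, ip + 1
--         return ip + 1, M - jp
--
--     def cell(base, ri, ci):
--         br, bc = ri // M, ci // M
--         k = base + quad_offset[(br, bc)]
--         a, b = ab(br, bc, ri % M, ci % M)
--         return (k, a, b)
--
--     # bases of the six faces laid out on the 3x4 grid of regions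
--     face_rows = [
--         [None, 1, None, None],
--         [5, 9, 13, 17],
--         [None, 21, None, None],
--     ]
--     matrix = []
--     for bases in face_rows:
--         for ri in range(region_size):
--             row = []
--             for base in bases:
--                 if base is None:
--                     row.extend([None] * region_size)
--                 else:
--                     row.extend(cell(base, ri, ci) for ci in range(region_size))
--             matrix.append(row)
--     return matrix
-- ===== Notes on version B (the rewrite author's own statement) =====
-- stated objective: alternative
-- what changed: B builds the matrix face-block by face-block (iterating the 3x4 region grid and concatenating region-wide segments per row), eliminating A's per-cell divmod of the global indices and the per-cell face_map membership test.
import Mathlib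
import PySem

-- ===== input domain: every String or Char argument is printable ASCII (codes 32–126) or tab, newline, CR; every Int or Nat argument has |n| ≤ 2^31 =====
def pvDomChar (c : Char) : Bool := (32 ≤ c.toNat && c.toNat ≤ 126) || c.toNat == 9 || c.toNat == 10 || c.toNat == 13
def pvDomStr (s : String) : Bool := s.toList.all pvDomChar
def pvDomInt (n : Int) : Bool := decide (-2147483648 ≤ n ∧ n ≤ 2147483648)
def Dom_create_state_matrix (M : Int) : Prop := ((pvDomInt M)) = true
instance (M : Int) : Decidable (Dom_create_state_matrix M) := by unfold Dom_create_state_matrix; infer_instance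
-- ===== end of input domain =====

-- B builds the matrix face-block by face-block instead of A's per-cell divmod + face_map membership test; objective: alternative decomposition (same cost).

-- ===== PORT A =====
-- A's nested helper ab(qr, qc, ip, jp)
def csmAb (M qr qc ip jp : Int) : Int × Int :=
  if qr = 0 ∧ qc = 0 then (M - jp, M - ip)
  else if qr = 0 ∧ qc = 1 then (M - ip, jp + 1)
  else if qr = 1 ∧ qc = 1 then (jp + 1, ip + 1)
  else (ip + 1, M - jp)

def csmFaceMap : PySem.Dict (Int × Int) (String × Int) :=
  PySem.Dict.ofList [((0, 1), ("W", 1)), ((1, 0), ("O", 5)), ((1, 1), ("G", 9)),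
    ((1, 2), ("R", 13)), ((1, 3), ("B", 17)), ((2, 1), ("Y", 21))]

def csmQuadOffset : PySem.Dict (Int × Int) Int :=
  PySem.Dict.ofList [((0, 0), 0), ((0, 1), 1), ((1, 1), 2), ((1, 0), 3)]

-- body of A's inner loop (one cell at column j of the row with rr, ri = divmod(i, region_size));
-- quad_offset[(br,bc)] is ported as getD _ 0: the key is always present when the loop runs (M > 0, so br,bc ∈ {0,1})
def csmCellA (M rr ri j : Int) : Option (Int × Int × Int) :=
  let region_size := 2 * M
  let rc := PySem.Int.floordiv j region_size
  let ci := PySem.Int.mod j region_size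
  match csmFaceMap.get? (rr, rc) with
  | some p =>
      let br := PySem.Int.floordiv ri M
      let bc := PySem.Int.floordiv ci M
      let k := p.2 + csmQuadOffset.getD (br, bc) 0
      let ab := csmAb M br bc (PySem.Int.mod ri M) (PySem.Int.mod ci M)
      some (k, ab.1, ab.2)
  | none => none

-- body of A's outer loop: the row at index i
def csmRowA (M i : Int) : List (Option (Int × Int × Int)) :=
  let region_size := 2 * M
  let rr := PySem.Int.floordiv i region_size
  let ri := PySem.Int.mod i region_size
  (PySem.List.pyRange 0 (4 * region_size) 1).map (fun j => csmCellA M rr ri j)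

def create_state_matrix (M : Int) : List (List (Option (Int × Int × Int))) :=
  (PySem.List.pyRange 0 (3 * (2 * M)) 1).map (fun i => csmRowA M i)

-- ===== PORT B =====
-- B's nested helper cell(base, ri, ci)
def csmCellB (M base ri ci : Int) : Option (Int × Int × Int) :=
  let br := PySem.Int.floordiv ri M
  let bc := PySem.Int.floordiv ci M
  let k := base + csmQuadOffset.getD (br, bc) 0
  let ab := csmAb M br bc (PySem.Int.mod ri M) (PySem.Int.mod ci M)
  some (k, ab.1, ab.2)

-- one region-wide segment of a row (row.extend(...) for a single entry of bases)
def csmSegB (M ri : Int) (base : Option Int) : List (Option (Int × Int × Int)) :=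
  match base with
  | none => List.replicate (2 * M).toNat none
  | some b => (PySem.List.pyRange 0 (2 * M) 1).map (fun ci => csmCellB M b ri ci)

def csmFaceRows : List (List (Option Int)) :=
  [[none, some 1, none, none], [some 5, some 9, some 13, some 17], [none, some 21, none, none]]

def create_state_matrix_alt (M : Int) : List (List (Option (Int × Int × Int))) :=
  csmFaceRows.flatMap (fun bases =>
    (PySem.List.pyRange 0 (2 * M) 1).map (fun ri => bases.flatMap (fun base => csmSegB M ri base)))

-- ===== PRECONDITION & SPEC =====
def Spec_create_state_matrix (M : Int) (out : List (List (Option (Int × Int × Int)))) : Prop := out = create_state_matrix_alt M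
instance (M : Int) (out : List (List (Option (Int × Int × Int)))) : Decidable (Spec_create_state_matrix M out) := by unfold Spec_create_state_matrix; infer_instance

-- ===== CLAIM (what is proved, stated in full; the proofs are below) =====
def Claim_equal_create_state_matrix : Prop := ∀ (M : Int), Dom_create_state_matrix M → Spec_create_state_matrix M (create_state_matrix M)

-- ===== LEMMAS AND PROOFS =====

-- divmod of q*s + k by s, for 0 ≤ k < s
theorem csm_fdiv (s q : Int) (k : Int) (hs : 0 < s) (h0 : 0 ≤ k) (hk : k < s) :
    PySem.Int.floordiv (q * s + k) s = q := by
  rw [PySem.Int.floordiv_eq_ediv_of_pos hs, add_comm,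
      Int.add_mul_ediv_right _ _ (ne_of_gt hs), Int.ediv_eq_zero_of_lt h0 hk, zero_add]

theorem csm_fmod (s q : Int) (k : Int) (hs : 0 < s) (h0 : 0 ≤ k) (hk : k < s) :
    PySem.Int.mod (q * s + k) s = k := by
  rw [PySem.Int.mod_eq_emod_of_pos hs, add_comm, Int.add_mul_emod_self_right,
      Int.emod_eq_of_lt h0 hk]

-- a map over one region-wide block of a range, re-indexed from 0
theorem csm_map_block {α : Type} (f : Int → α) (s q : Int) (_hs : 0 ≤ s) :
    (PySem.List.pyRange (q * s) ((q + 1) * s) 1).map f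
      = (List.range s.toNat).map (fun (k : Nat) => f (q * s + (k : Int))) := by
  rw [PySem.List.pyRange_one, List.map_map]
  have h : (q + 1) * s - q * s = s := by ring
  rw [h]
  rfl

-- one cell of A's row, at global column rc*(2M)+c, with the divmod resolved
theorem csm_cellA_eq (M q rc : Int) (hM : 0 < M) (k c : Int)
    (hc0 : 0 ≤ c) (hc : c < 2 * M) :
    csmCellA M q k (rc * (2 * M) + c)
      = match csmFaceMap.get? (q, rc) with
        | some p => csmCellB M p.2 k c
        | none => none := by
  have h2 : (0:Int) < 2 * M := by omega
  simp only [csmCellA, csmCellB, csm_fdiv (2*M) rc c h2 hc0 hc, csm_fmod (2*M) rc c h2 hc0 hc]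

-- one region-wide block of A's row equals B's segment for that region
theorem csm_seg_eq (M q rc : Int) (hM : 0 < M) (k : Int) :
    (PySem.List.pyRange (rc * (2 * M)) ((rc + 1) * (2 * M)) 1).map (fun j => csmCellA M q k j)
      = csmSegB M k ((csmFaceMap.get? (q, rc)).map (·.2)) := by
  rw [csm_map_block _ (2 * M) rc (by omega)]
  cases hfm : csmFaceMap.get? (q, rc) with
  | none =>
      simp only [csmSegB, Option.map_none]
      rw [List.map_congr_left (fun c hc => by
        rw [csm_cellA_eq M q rc hM k c (by exact_mod_cast Nat.zero_le c)
              (by have := List.mem_range.mp hc; omega), hfm])]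
      simp
  | some p =>
      simp only [csmSegB, Option.map_some]
      rw [show PySem.List.pyRange 0 (2 * M) 1
            = PySem.List.pyRange (0 * (2 * M)) ((0 + 1) * (2 * M)) 1 by norm_num,
          csm_map_block _ (2 * M) 0 (by omega)]
      refine List.map_congr_left (fun c hc => ?_)
      rw [csm_cellA_eq M q rc hM k c (by exact_mod_cast Nat.zero_le c)
            (by have := List.mem_range.mp hc; omega), hfm]
      norm_num

-- A's row at index q*(2M)+k equals B's row for region-row q
theorem csm_rowA_eq (M q : Int) (hM : 0 < M) (k : Int) (hk0 : 0 ≤ k) (hk : k < 2 * M)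
    (b0 b1 b2 b3 : Option Int)
    (h0 : b0 = (csmFaceMap.get? (q, 0)).map (·.2))
    (h1 : b1 = (csmFaceMap.get? (q, 1)).map (·.2))
    (h2 : b2 = (csmFaceMap.get? (q, 2)).map (·.2))
    (h3 : b3 = (csmFaceMap.get? (q, 3)).map (·.2)) :
    csmRowA M (q * (2 * M) + k) = [b0, b1, b2, b3].flatMap (fun base => csmSegB M k base) := by
  have h2M : (0:Int) < 2 * M := by omega
  simp only [csmRowA, csm_fdiv (2*M) q k h2M hk0 hk, csm_fmod (2*M) q k h2M hk0 hk]
  rw [PySem.List.pyRange_one_append 0 (2*M) (4*(2*M)) (by omega) (by omega),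
      PySem.List.pyRange_one_append (2*M) (2*(2*M)) (4*(2*M)) (by omega) (by omega),
      PySem.List.pyRange_one_append (2*(2*M)) (3*(2*M)) (4*(2*M)) (by omega) (by omega)]
  simp only [List.map_append, List.flatMap_cons, List.flatMap_nil, List.append_nil]
  rw [show PySem.List.pyRange 0 (2*M) 1 = PySem.List.pyRange (0*(2*M)) ((0+1)*(2*M)) 1 by norm_num,
      show PySem.List.pyRange (2*M) (2*(2*M)) 1 = PySem.List.pyRange (1*(2*M)) ((1+1)*(2*M)) 1 by norm_num,
      show PySem.List.pyRange (2*(2*M)) (3*(2*M)) 1 = PySem.List.pyRange (2*(2*M)) ((2+1)*(2*M)) 1 by norm_num,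
      show PySem.List.pyRange (3*(2*M)) (4*(2*M)) 1 = PySem.List.pyRange (3*(2*M)) ((3+1)*(2*M)) 1 by norm_num,
      csm_seg_eq M q 0 hM k, csm_seg_eq M q 1 hM k,
      csm_seg_eq M q 2 hM k, csm_seg_eq M q 3 hM k,
      h0, h1, h2, h3]

-- ===== VERDICT (by name: the statement is the Claim_ definition above) =====
theorem create_state_matrix_spec : Claim_equal_create_state_matrix := by
  intro M _
  unfold Spec_create_state_matrix
  by_cases hM : 0 < M
  · rw [create_state_matrix, create_state_matrix_alt,
        PySem.List.pyRange_one_append 0 (2*M) (3*(2*M)) (by omega) (by omega),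
        PySem.List.pyRange_one_append (2*M) (2*(2*M)) (3*(2*M)) (by omega) (by omega)]
    simp only [List.map_append, csmFaceRows, List.flatMap_cons, List.flatMap_nil, List.append_nil]
    rw [show PySem.List.pyRange 0 (2*M) 1 = PySem.List.pyRange (0*(2*M)) ((0+1)*(2*M)) 1 by norm_num,
        show PySem.List.pyRange (2*M) (2*(2*M)) 1 = PySem.List.pyRange (1*(2*M)) ((1+1)*(2*M)) 1 by norm_num,
        show PySem.List.pyRange (2*(2*M)) (3*(2*M)) 1 = PySem.List.pyRange (2*(2*M)) ((2+1)*(2*M)) 1 by norm_num]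
    rw [csm_map_block _ (2*M) 0 (by omega), csm_map_block _ (2*M) 1 (by omega),
        csm_map_block _ (2*M) 2 (by omega), csm_map_block _ (2*M) 0 (by omega),
        csm_map_block _ (2*M) 0 (by omega), csm_map_block _ (2*M) 0 (by omega)]
    congr 1
    · refine List.map_congr_left (fun k hk => ?_)
      have hkb := List.mem_range.mp hk
      rw [csm_rowA_eq M 0 hM (k : Int) (Int.natCast_nonneg k) (by omega) _ _ _ _
            rfl rfl rfl rfl]
      simp only [List.flatMap_cons, List.flatMap_nil, List.append_nil, zero_mul, zero_add]
      rfl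
    congr 1
    · refine List.map_congr_left (fun k hk => ?_)
      have hkb := List.mem_range.mp hk
      rw [csm_rowA_eq M 1 hM (k : Int) (Int.natCast_nonneg k) (by omega) _ _ _ _
            rfl rfl rfl rfl]
      simp only [List.flatMap_cons, List.flatMap_nil, List.append_nil, zero_mul, zero_add]
      rfl
    · refine List.map_congr_left (fun k hk => ?_)
      have hkb := List.mem_range.mp hk
      rw [csm_rowA_eq M 2 hM (k : Int) (Int.natCast_nonneg k) (by omega) _ _ _ _
            rfl rfl rfl rfl]
      simp only [List.flatMap_cons, List.flatMap_nil, List.append_nil, zero_mul, zero_add]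
      rfl
  · rw [create_state_matrix, create_state_matrix_alt,
        PySem.List.pyRange_one_eq_nil (by omega), PySem.List.pyRange_one_eq_nil (by omega)]
    simp [csmFaceRows]
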